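-- pv_equiv track=rewrite | github.com/adjcjh777/lark_ai_challenge_openclaw_longterm_memory | scripts/run_workspace_ingestion_schedule.py | _resource_type_counts
-- ===== SOURCE A (Python) =====
-- from typing import Any
--
-- def _resource_type_counts(resources: list[Any]) -> dict[str, int]:
--     counts: dict[str, int] = {}
--     for resource in resources:
--         if not isinstance(resource, dict):
--             continue
--         resource_type = str(resource.get("resource_type") or "unknown")
--         counts[resource_type] = counts.get(resource_type, 0) + 1
--     return dict(sorted(counts.items()))
-- ===== SOURCE B (Python) =====
-- from itertools import groupby
-- from typing import Any
--
--
-- def _resource_type_counts(resources: list[Any]) -> dict[str, int]: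
--     keys = sorted(
--         str(r.get("resource_type") or "unknown")
--         for r in resources
--         if isinstance(r, dict)
--     )
--     return {k: sum(1 for _ in grp) for k, grp in groupby(keys)}
-- ===== Notes on version B (the rewrite author's own statement) =====
-- stated objective: alternative
-- what changed: Replaces the hash-accumulate-then-sort pass (dict of running counts, sorted at the end) by extract-normalized-keys, sort the key list once, then run-length count adjacent equal keys with itertools.groupby, yielding the dict already in sorted order.
import Mathlib
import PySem

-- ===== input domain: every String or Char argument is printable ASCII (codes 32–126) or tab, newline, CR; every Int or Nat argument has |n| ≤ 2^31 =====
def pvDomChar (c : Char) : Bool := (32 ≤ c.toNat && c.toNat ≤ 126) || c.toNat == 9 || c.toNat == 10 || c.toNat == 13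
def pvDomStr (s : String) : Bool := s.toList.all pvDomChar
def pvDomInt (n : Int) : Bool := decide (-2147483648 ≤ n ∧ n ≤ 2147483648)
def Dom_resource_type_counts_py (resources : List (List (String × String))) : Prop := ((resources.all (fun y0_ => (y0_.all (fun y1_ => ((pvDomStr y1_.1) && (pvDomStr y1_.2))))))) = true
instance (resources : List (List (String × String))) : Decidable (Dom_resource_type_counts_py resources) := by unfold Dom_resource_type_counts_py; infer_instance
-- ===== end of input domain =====

-- ===== PORT A =====
-- Header: B replaces A's hash-accumulate-then-sort (dict of counts, sorted items) by
-- sort-the-key-list-then-group-count (itertools.groupby run-length pass); alternative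
-- decomposition, same result.

-- shared expression both Pythons contain: str(r.get("resource_type") or "unknown")
-- (missing key or empty string — the only falsy str — falls back to "unknown")
def pvKey (r : List (String × String)) : String :=
  match (PySem.Dict.mk r).get? "resource_type" with
  | none => "unknown"
  | some s => if s = "" then "unknown" else s

-- port of A: counts[k] = counts.get(k, 0) + 1 over the resources, then sorted(counts.items()).
-- (isinstance(resource, dict) is always true under the type List (String × String);
--  dict keys are distinct, so Python's tuple sort of items only ever compares the first
--  components — ported as sorting by the key component)
def resource_type_counts_py (resources : List (List (String × String))) : List (String × Int) :=
  let counts := resources.foldl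
    (fun counts r =>
      let resource_type := pvKey r
      counts.insert resource_type (counts.getD resource_type 0 + 1))
    PySem.Dict.empty
  PySem.List.sorted counts.items (fun p => p.1) false

-- ===== PORT B =====
-- itertools.groupby over a list: one maximal run of equal adjacent elements per step,
-- each group counted by sum(1 for _ in grp)
def pvGroupCount : List String → List (String × Int)
  | [] => []
  | x :: xs =>
    (x, 1 + (xs.takeWhile (· == x)).length) :: pvGroupCount (xs.dropWhile (· == x))
termination_by l => l.length
decreasing_by
  simpa using Nat.lt_succ_of_le (List.length_dropWhile_le _ _)

-- port of B: sorted list of normalized keys, then groupby run-length counting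
def resource_type_counts_py_alt (resources : List (List (String × String))) : List (String × Int) :=
  pvGroupCount (PySem.List.sorted (resources.map pvKey) (fun x => x) false)

-- ===== PRECONDITION & SPEC =====
def Spec_resource_type_counts_py (resources : List (List (String × String))) (out : List (String × Int)) : Prop := out = resource_type_counts_py_alt resources
instance (resources : List (List (String × String))) (out : List (String × Int)) : Decidable (Spec_resource_type_counts_py resources out) := by unfold Spec_resource_type_counts_py; infer_instance

-- ===== CLAIM (what is proved, stated in full; the proofs are below) =====
def Claim_equal_resource_type_counts_py : Prop := ∀ (resources : List (List (String × String))), Dom_resource_type_counts_py resources → Spec_resource_type_counts_py resources (resource_type_counts_py resources)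

-- ===== LEMMAS AND PROOFS =====

theorem pv_lt_of_mem_dropWhile (x : String) (xs : List String)
    (hle : ∀ e ∈ xs, x ≤ e) (hp : xs.Pairwise (· ≤ ·)) :
    ∀ e ∈ xs.dropWhile (· == x), x < e := by
  intro e he
  rcases hr : xs.dropWhile (· == x) with _ | ⟨h, t⟩
  · simp [hr] at he
  · have hsfx : (h :: t) <:+ xs := hr ▸ List.dropWhile_suffix _
    have hhx : (h == x) = false := by
      have := List.head?_dropWhile_not (· == x) xs
      rw [hr] at this; simpa using this
    have hxh : x < h := by
      have : x ≤ h := hle h (hsfx.subset (by simp))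
      rcases lt_or_eq_of_le this with h1 | h1
      · exact h1
      · simp [← h1] at hhx
    rw [hr] at he
    rcases List.mem_cons.mp he with he | he
    · exact he ▸ hxh
    · have hpr : (h :: t).Pairwise (· ≤ ·) := hp.sublist hsfx.sublist
      exact lt_of_lt_of_le hxh ((List.pairwise_cons.mp hpr).1 e he)

theorem pv_count_head (x : String) (xs : List String)
    (hle : ∀ e ∈ xs, x ≤ e) (hp : xs.Pairwise (· ≤ ·)) :
    ((x :: xs).count x : Int) = 1 + (xs.takeWhile (· == x)).length := by
  have hrlt := pv_lt_of_mem_dropWhile x xs hle hp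
  have hg : ∀ e ∈ xs.takeWhile (· == x), x = e := by
    intro e he
    have h' : e = x := by simpa using List.mem_takeWhile_imp he
    exact h'.symm
  have hsplit : xs.takeWhile (· == x) ++ xs.dropWhile (· == x) = xs :=
    List.takeWhile_append_dropWhile
  have hg' : (xs.takeWhile (· == x)).count x = (xs.takeWhile (· == x)).length :=
    List.count_eq_length.mpr hg
  have hr0 : (xs.dropWhile (· == x)).count x = 0 :=
    List.count_eq_zero.mpr (fun hmem => lt_irrefl x (hrlt x hmem))
  have h1 : xs.count x = (xs.takeWhile (· == x)).length := by
    conv_lhs => rw [← hsplit]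
    rw [List.count_append, hg', hr0]
    omega
  rw [List.count_cons_self, h1]
  push_cast
  ring

theorem pv_count_tail (x k : String) (xs : List String) (hk : k ≠ x) :
    (x :: xs).count k = (xs.dropWhile (· == x)).count k := by
  have hsplit : xs.takeWhile (· == x) ++ xs.dropWhile (· == x) = xs :=
    List.takeWhile_append_dropWhile
  have hg0 : (xs.takeWhile (· == x)).count k = 0 := by
    refine List.count_eq_zero.mpr (fun hmem => ?_)
    have h' : k = x := by simpa using List.mem_takeWhile_imp hmem
    exact hk h'
  have : xs.count k = (xs.dropWhile (· == x)).count k := by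
    conv_lhs => rw [← hsplit]
    rw [List.count_append, hg0]
    omega
  simp [Ne.symm hk, this]

theorem pv_mem_groupCount : ∀ (l : List String), l.Pairwise (· ≤ ·) → ∀ (p : String × Int),
    (p ∈ pvGroupCount l ↔ p.1 ∈ l ∧ p.2 = (l.count p.1 : Int)) := by
  intro l
  induction l using pvGroupCount.induct with
  | case1 => intro _ p; simp [pvGroupCount]
  | case2 x xs ih =>
    intro hp p
    obtain ⟨hle, hpxs⟩ := List.pairwise_cons.mp hp
    have hpr : (xs.dropWhile (· == x)).Pairwise (· ≤ ·) :=
      hpxs.sublist (List.dropWhile_suffix _).sublist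
    have hrlt := pv_lt_of_mem_dropWhile x xs hle hpxs
    have hrle : ∀ e ∈ xs.dropWhile (· == x), e ∈ xs :=
      fun e he => (List.dropWhile_suffix _).subset he
    rw [pvGroupCount]
    constructor
    · intro hmem
      rcases List.mem_cons.mp hmem with he | he
      · subst he
        exact ⟨List.mem_cons_self, by rw [pv_count_head x xs hle hpxs]⟩
      · obtain ⟨h1, h2⟩ := (ih hpr p).mp he
        have hne : p.1 ≠ x := fun hx => lt_irrefl x (hx ▸ hrlt p.1 h1)
        refine ⟨List.mem_cons_of_mem _ (hrle _ h1), ?_⟩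
        rw [pv_count_tail x p.1 xs hne]
        exact h2
    · rintro ⟨h1, h2⟩
      by_cases hx : p.1 = x
      · have hv : p.2 = 1 + ((xs.takeWhile (· == x)).length : Int) := by
          rw [h2, hx, pv_count_head x xs hle hpxs]
        exact List.mem_cons.mpr (Or.inl (Prod.ext hx hv))
      · right
        apply (ih hpr p).mpr
        have hmem : p.1 ∈ xs := by
          rcases List.mem_cons.mp h1 with h | h
          · exact absurd h hx
          · exact h
        have hmemr : p.1 ∈ xs.dropWhile (· == x) := by
          have : p.1 ∉ xs.takeWhile (· == x) := by
            intro hmem'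
            have := List.mem_takeWhile_imp hmem'
            simp at this
            exact hx this
          have := List.takeWhile_append_dropWhile (p := (· == x)) (l := xs)
          rw [← this] at hmem
          rcases List.mem_append.mp hmem with h | h
          · exact absurd h ‹p.1 ∉ _›
          · exact h
        refine ⟨hmemr, ?_⟩
        rw [h2, pv_count_tail x p.1 xs hx]

theorem pv_groupCount_pairwise : ∀ (l : List String), l.Pairwise (· ≤ ·) →
    (pvGroupCount l).Pairwise (fun a b => a.1 < b.1) := by
  intro l
  induction l using pvGroupCount.induct with
  | case1 => intro _; simp [pvGroupCount]
  | case2 x xs ih =>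
    intro hp
    obtain ⟨hle, hpxs⟩ := List.pairwise_cons.mp hp
    have hpr : (xs.dropWhile (· == x)).Pairwise (· ≤ ·) :=
      hpxs.sublist (List.dropWhile_suffix _).sublist
    have hrlt := pv_lt_of_mem_dropWhile x xs hle hpxs
    rw [pvGroupCount]
    refine List.pairwise_cons.mpr ⟨?_, ih hpr⟩
    intro p hmem
    have := (pv_mem_groupCount _ hpr p).mp hmem
    exact hrlt p.1 this.1


theorem pv_main (resources : List (List (String × String))) :
    resource_type_counts_py resources = resource_type_counts_py_alt resources := by
  unfold resource_type_counts_py resource_type_counts_py_alt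
  set ks := resources.map pvKey with hks
  set l := PySem.List.sorted ks (fun x => x) false with hl
  have hfold : resources.foldl
      (fun counts r => counts.insert (pvKey r) (counts.getD (pvKey r) 0 + 1))
      PySem.Dict.empty = PySem.Dict.counter ks := by
    rw [hks, ← PySem.Dict.foldl_insert_getD_add_one_eq_counter, List.foldl_map]
  simp only []
  rw [hfold, PySem.Dict.items_counter]
  have hpl : l.Pairwise (· ≤ ·) := PySem.List.sorted_pairwise ks (fun x => x) 
  have hperm_l : l.Perm ks := PySem.List.sorted_perm ks (fun x => x) false
  have hpw := pv_groupCount_pairwise l hpl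
  refine PySem.List.sorted_eq_of_perm_of_pairwise_lt _ _ _ ?_ ?_
  · -- Perm
    apply List.perm_of_nodup_nodup_toFinset_eq
    · exact hpw.imp (fun {a b} h => fun he => absurd (he ▸ h) (lt_irrefl _))
    · refine (PySem.Set.nodup_ofList ks).map_on ?_
      intro a _ b _ h
      exact congrArg Prod.fst h
    · ext p
      simp only [List.mem_toFinset, List.mem_map]
      rw [pv_mem_groupCount l hpl p]
      constructor
      · rintro ⟨h1, h2⟩
        refine ⟨p.1, ?_, ?_⟩
        · rw [PySem.Set.mem_ofList]
          exact hperm_l.subset h1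
        · rw [hperm_l.count_eq] at h2
          exact Prod.ext rfl h2.symm
      · rintro ⟨k, hk, hkp⟩
        rw [PySem.Set.mem_ofList] at hk
        have h1 : p.1 = k := (congrArg Prod.fst hkp).symm
        refine ⟨?_, ?_⟩
        · exact h1 ▸ (hperm_l.mem_iff.mpr hk)
        · have := (congrArg Prod.snd hkp).symm
          simpa [h1, hperm_l.count_eq] using this
  · exact hpw

-- ===== VERDICT (by name: the statement is the Claim_ definition above) =====
theorem resource_type_counts_py_spec : Claim_equal_resource_type_counts_py := by
  intro resources _
  unfold Spec_resource_type_counts_py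
  exact pv_main resources
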